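-- pv_equiv track=rewrite | github.com/PeterPlevko/STU-FIIT | Algebra/zadanie/10/10-1.py | calculate_diam
-- ===== SOURCE A (Python) =====
-- def get_sum(Z,X1,X2 = 0):
--     ret = (0 + X1 + X2) % Z
--     return ret
--
-- def get_dist(n,Z,X):
--     diam = -1
--     for i,M1 in enumerate(X):
--         sum = get_sum(Z,M1)
--         if(sum == n):
--             return 1
--         for j,M2 in enumerate(X):
--             if(j < i):
--                 continue
--             # test move combination
--             sum = get_sum(Z,M1,M2)
--             if(sum == n):
--                 diam = 2
--     return diam
--
-- def calculate_diam(Z1,X):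
--     max = -2
--     for i in range(1,Z1):
--         dist = get_dist(i,Z1,X)
--         if dist == -1:
--             return 0
--         if (dist > max):
--             max = dist
--     if max == 1:
--         return 0
--     if max == 2:
--         return 1
--     return -1
-- ===== SOURCE B (Python) =====
-- def calculate_diam(Z1, X):
--     if Z1 < 2:
--         return -1
--     s1 = {x % Z1 for x in X}
--     s12 = s1 | {(x + y) % Z1 for x in X for y in X}
--     if len(s1 - {0}) == Z1 - 1:
--         return 0
--     if len(s12 - {0}) == Z1 - 1:
--         return 1
--     return 0
-- ===== Notes on version B (the rewrite author's own statement) =====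
-- stated objective: faster
-- what changed: Instead of rescanning all elements and element pairs once per residue n in 1..Z1-1, B builds the set of single-element residues and the set of pairwise-sum residues once and classifies by comparing the count of nonzero residues reached against Z1-1.
import Mathlib
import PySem

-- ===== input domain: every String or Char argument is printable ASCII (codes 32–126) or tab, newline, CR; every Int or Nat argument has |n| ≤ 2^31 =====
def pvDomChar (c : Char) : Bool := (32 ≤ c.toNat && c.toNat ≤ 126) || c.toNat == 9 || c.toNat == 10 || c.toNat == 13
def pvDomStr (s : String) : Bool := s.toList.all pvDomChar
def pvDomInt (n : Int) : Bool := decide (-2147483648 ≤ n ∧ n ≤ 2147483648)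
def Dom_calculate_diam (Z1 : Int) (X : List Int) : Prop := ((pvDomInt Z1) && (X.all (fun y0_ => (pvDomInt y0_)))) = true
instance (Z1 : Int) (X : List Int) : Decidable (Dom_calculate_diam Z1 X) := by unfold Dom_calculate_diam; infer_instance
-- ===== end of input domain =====

-- B replaces A's per-residue rescans of all elements and pairs by two residue
-- sets built once plus subset tests (objective: faster, asymptotic).

-- ===== PORT A =====
def get_sum (Z X1 X2 : Int) : Int := PySem.Int.mod (0 + X1 + X2) Z

def get_dist_inner (n Z M1 i : Int) : List (Int × Int) → Int → Int
  | [], diam => diam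
  | (j, M2) :: rest, diam =>
    if j < i then get_dist_inner n Z M1 i rest diam
    else if get_sum Z M1 M2 == n then get_dist_inner n Z M1 i rest 2
    else get_dist_inner n Z M1 i rest diam

def get_dist_go (n Z : Int) (X : List Int) : List (Int × Int) → Int → Int
  | [], diam => diam
  | (i, M1) :: rest, diam =>
    if get_sum Z M1 0 == n then 1
    else get_dist_go n Z X rest (get_dist_inner n Z M1 i (PySem.List.enumerate X 0) diam)

def get_dist (n Z : Int) (X : List Int) : Int :=
  get_dist_go n Z X (PySem.List.enumerate X 0) (-1)

def calc_go (Z1 : Int) (X : List Int) : List Int → Int → Int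
  | [], mx => if mx == 1 then 0 else if mx == 2 then 1 else -1
  | i :: rest, mx =>
    let dist := get_dist i Z1 X
    if dist == -1 then 0
    else if dist > mx then calc_go Z1 X rest dist
    else calc_go Z1 X rest mx

def calculate_diam (Z1 : Int) (X : List Int) : Int :=
  calc_go Z1 X (PySem.List.pyRange 1 Z1 1) (-2)

-- ===== PORT B =====
def calculate_diam_alt (Z1 : Int) (X : List Int) : Int :=
  if Z1 < 2 then -1 else
  let s1 : PySem.Set Int := PySem.Set.ofList (X.map (fun x => PySem.Int.mod x Z1))
  let s12 : PySem.Set Int :=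
    PySem.Set.union s1 (PySem.Set.ofList (X.flatMap (fun x => X.map (fun y => PySem.Int.mod (x + y) Z1))))
  if PySem.Set.len (PySem.Set.diff s1 [0]) = Z1 - 1 then 0
  else if PySem.Set.len (PySem.Set.diff s12 [0]) = Z1 - 1 then 1
  else 0

-- ===== PRECONDITION & SPEC =====
def Spec_calculate_diam (Z1 : Int) (X : List Int) (out : Int) : Prop := out = calculate_diam_alt Z1 X
instance (Z1 : Int) (X : List Int) (out : Int) : Decidable (Spec_calculate_diam Z1 X out) := by unfold Spec_calculate_diam; infer_instance

-- ===== CLAIM (what is proved, stated in full; the proofs are below) =====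
def Claim_equal_calculate_diam : Prop := ∀ (Z1 : Int) (X : List Int), Dom_calculate_diam Z1 X → Spec_calculate_diam Z1 X (calculate_diam Z1 X)

-- ===== LEMMAS AND PROOFS =====

-- single-residue hit and pair-residue hit, as used by both programs
abbrev hitS (n Z : Int) (X : List Int) : Prop := ∃ x ∈ X, PySem.Int.mod x Z = n
abbrev hitP (n Z : Int) (X : List Int) : Prop := ∃ x ∈ X, ∃ y ∈ X, PySem.Int.mod (x + y) Z = n

lemma get_sum_eq (Z X1 X2 : Int) : get_sum Z X1 X2 = PySem.Int.mod (X1 + X2) Z := by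
  simp [get_sum]

lemma inner_eq (n Z M1 i : Int) (l : List (Int × Int)) (d : Int) :
    get_dist_inner n Z M1 i l d =
      if ∃ p ∈ l, i ≤ p.1 ∧ PySem.Int.mod (M1 + p.2) Z = n then 2 else d := by
  induction l generalizing d with
  | nil => simp [get_dist_inner]
  | cons p rest ih =>
    obtain ⟨j, M2⟩ := p
    simp only [get_dist_inner, get_sum_eq]
    by_cases hj : j < i
    · rw [if_pos hj, ih]
      have : ¬ (i ≤ (j, M2).1 ∧ PySem.Int.mod (M1 + (j, M2).2) Z = n) := by
        simp; intro h; omega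
      simp only [List.exists_mem_cons_iff, this, false_or]
    · rw [if_neg hj]
      by_cases hm : PySem.Int.mod (M1 + M2) Z = n
      · have hb : (PySem.Int.mod (M1 + M2) Z == n) = true := by simp [hm]
        rw [hb, if_pos rfl, ih]
        have : ∃ p ∈ (j, M2) :: rest, i ≤ p.1 ∧ PySem.Int.mod (M1 + p.2) Z = n :=
          ⟨(j, M2), by simp, by simp; exact ⟨by omega, hm⟩⟩
        rw [if_pos this]
        split <;> rfl
      · have hb : (PySem.Int.mod (M1 + M2) Z == n) = false := by simp [hm]
        rw [hb]
        simp only [Bool.false_eq_true, if_false, ih]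
        have : ¬ (i ≤ (j, M2).1 ∧ PySem.Int.mod (M1 + (j, M2).2) Z = n) := by
          simp; intro _; exact hm
        simp only [List.exists_mem_cons_iff, this, false_or]

lemma go_eq (n Z : Int) (X : List Int) (l : List (Int × Int)) (d : Int) :
    get_dist_go n Z X l d =
      if ∃ p ∈ l, PySem.Int.mod p.2 Z = n then 1
      else if ∃ p ∈ l, ∃ q ∈ PySem.List.enumerate X 0,
              p.1 ≤ q.1 ∧ PySem.Int.mod (p.2 + q.2) Z = n then 2
      else d := by
  induction l generalizing d with
  | nil => simp [get_dist_go]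
  | cons p rest ih =>
    obtain ⟨i, M1⟩ := p
    simp only [get_dist_go, get_sum_eq, add_zero]
    by_cases hs : PySem.Int.mod M1 Z = n
    · have hb : (PySem.Int.mod M1 Z == n) = true := by simp [hs]
      rw [hb, if_pos rfl]
      have : ∃ p ∈ (i, M1) :: rest, PySem.Int.mod p.2 Z = n := ⟨(i, M1), by simp, hs⟩
      rw [if_pos this]
    · have hb : (PySem.Int.mod M1 Z == n) = false := by simp [hs]
      rw [hb]
      simp only [Bool.false_eq_true, if_false, ih, inner_eq]
      have hsc : (∃ p ∈ (i, M1) :: rest, PySem.Int.mod p.2 Z = n) ↔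
          (∃ p ∈ rest, PySem.Int.mod p.2 Z = n) := by
        simp only [List.exists_mem_cons_iff, hs, false_or]
      rw [if_congr hsc rfl rfl]
      by_cases h1 : ∃ p ∈ rest, PySem.Int.mod p.2 Z = n
      · rw [if_pos h1, if_pos h1]
      · rw [if_neg h1, if_neg h1]
        have hpc : (∃ p ∈ (i, M1) :: rest, ∃ q ∈ PySem.List.enumerate X 0,
            p.1 ≤ q.1 ∧ PySem.Int.mod (p.2 + q.2) Z = n) ↔
            ((∃ q ∈ PySem.List.enumerate X 0, i ≤ q.1 ∧ PySem.Int.mod (M1 + q.2) Z = n) ∨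
             (∃ p ∈ rest, ∃ q ∈ PySem.List.enumerate X 0,
               p.1 ≤ q.1 ∧ PySem.Int.mod (p.2 + q.2) Z = n)) := by
          simp only [List.exists_mem_cons_iff]
        rw [if_congr hpc rfl rfl]
        by_cases hi : ∃ q ∈ PySem.List.enumerate X 0, i ≤ q.1 ∧ PySem.Int.mod (M1 + q.2) Z = n
        · rw [if_pos hi, if_pos (Or.inl hi)]
          split <;> rfl
        · rw [if_neg hi]
          by_cases hr : ∃ p ∈ rest, ∃ q ∈ PySem.List.enumerate X 0,
              p.1 ≤ q.1 ∧ PySem.Int.mod (p.2 + q.2) Z = n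
          · rw [if_pos hr, if_pos (Or.inr hr)]
          · rw [if_neg hr, if_neg (not_or.mpr ⟨hi, hr⟩)]

lemma mem_enum_snd {X : List Int} {p : Int × Int} (h : p ∈ PySem.List.enumerate X 0) :
    p.2 ∈ X := by
  have := (PySem.List.mem_enumerate_iff _ _ _).mp h
  obtain ⟨k, hk, rfl⟩ := this
  simp

lemma pair_iff (n Z : Int) (X : List Int) :
    (∃ p ∈ PySem.List.enumerate X 0, ∃ q ∈ PySem.List.enumerate X 0,
      p.1 ≤ q.1 ∧ PySem.Int.mod (p.2 + q.2) Z = n) ↔ hitP n Z X := by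
  constructor
  · rintro ⟨p, hp, q, hq, _, hm⟩
    exact ⟨p.2, mem_enum_snd hp, q.2, mem_enum_snd hq, hm⟩
  · rintro ⟨x, hx, y, hy, hm⟩
    obtain ⟨k, hk, rfl⟩ := List.mem_iff_getElem.mp hx
    obtain ⟨m, hm', rfl⟩ := List.mem_iff_getElem.mp hy
    have hkmem : ((0 : Int) + k, X[k]) ∈ PySem.List.enumerate X 0 :=
      (PySem.List.mem_enumerate_iff _ _ _).mpr ⟨k, hk, rfl⟩
    have hmmem : ((0 : Int) + m, X[m]) ∈ PySem.List.enumerate X 0 :=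
      (PySem.List.mem_enumerate_iff _ _ _).mpr ⟨m, hm', rfl⟩
    by_cases hkm : k ≤ m
    · exact ⟨_, hkmem, _, hmmem, by simp; exact_mod_cast hkm, hm⟩
    · exact ⟨_, hmmem, _, hkmem, by simp; omega, by rw [Int.add_comm]; exact hm⟩

lemma get_dist_eq (n Z : Int) (X : List Int) :
    get_dist n Z X = if hitS n Z X then 1 else if hitP n Z X then 2 else -1 := by
  rw [get_dist, go_eq]
  have h1 : (∃ p ∈ PySem.List.enumerate X 0, PySem.Int.mod p.2 Z = n) ↔ hitS n Z X := by
    constructor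
    · rintro ⟨p, hp, hm⟩; exact ⟨p.2, mem_enum_snd hp, hm⟩
    · rintro ⟨x, hx, hm⟩
      obtain ⟨k, hk, rfl⟩ := List.mem_iff_getElem.mp hx
      exact ⟨_, (PySem.List.mem_enumerate_iff _ _ _).mpr ⟨k, hk, rfl⟩, hm⟩
  simp only [h1, pair_iff n Z X]

lemma get_dist_cases (n Z : Int) (X : List Int) :
    get_dist n Z X = 1 ∨ get_dist n Z X = 2 ∨ get_dist n Z X = -1 := by
  rw [get_dist_eq]; split_ifs <;> simp

lemma calc_go_eq (Z1 : Int) (X : List Int) (l : List Int) :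
    ∀ m : Int, m = -2 ∨ m = 1 ∨ m = 2 →
    calc_go Z1 X l m =
      if ∃ i ∈ l, get_dist i Z1 X = -1 then 0
      else if m = 2 ∨ ∃ i ∈ l, get_dist i Z1 X = 2 then 1
      else if m = 1 ∨ l ≠ [] then 0 else -1 := by
  induction l with
  | nil =>
    intro m hm
    simp only [calc_go, List.not_mem_nil, false_and, exists_false]
    rcases hm with rfl | rfl | rfl <;> simp
  | cons i rest ih =>
    intro m hm
    simp only [calc_go]
    rcases hm with rfl | rfl | rfl <;>
      rcases get_dist_cases i Z1 X with hd | hd | hd <;>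
        rw [hd] <;>
          [rw [show ((1:Int) == -1) = false from rfl, if_pos (show (1:Int) > -2 by norm_num), ih 1 (by omega)];
           rw [show ((2:Int) == -1) = false from rfl, if_pos (show (2:Int) > -2 by norm_num), ih 2 (by omega)];
           rw [show ((-1:Int) == -1) = true from rfl];
           rw [show ((1:Int) == -1) = false from rfl, if_neg (show ¬ (1:Int) > 1 by norm_num), ih 1 (by omega)];
           rw [show ((2:Int) == -1) = false from rfl, if_pos (show (2:Int) > 1 by norm_num), ih 2 (by omega)];
           rw [show ((-1:Int) == -1) = true from rfl];
           rw [show ((1:Int) == -1) = false from rfl, if_neg (show ¬ (1:Int) > 2 by norm_num), ih 2 (by omega)];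
           rw [show ((2:Int) == -1) = false from rfl, if_neg (show ¬ (2:Int) > 2 by norm_num), ih 2 (by omega)];
           rw [show ((-1:Int) == -1) = true from rfl]] <;>
      simp only [List.exists_mem_cons_iff, hd,
        show ((1:Int) = -1) ↔ False from by norm_num,
        show ((2:Int) = -1) ↔ False from by norm_num,
        show ((1:Int) = 2) ↔ False from by norm_num,
        show ((2:Int) = 2) ↔ True from by norm_num,
        show ((-1:Int) = -1) ↔ True from by norm_num,
        show ((-1:Int) = 2) ↔ False from by norm_num,
        show ((-2:Int) = 2) ↔ False from by norm_num,
        show ((-2:Int) = 1) ↔ False from by norm_num,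
        show ((1:Int) = 1) ↔ True from by norm_num,
        show ((2:Int) = 1) ↔ False from by norm_num,
        Bool.false_eq_true, eq_self_iff_true, if_false, if_true, false_or, true_or, or_true,
        or_false, List.cons_ne_nil, ne_eq, not_false_iff, true_and, false_and, exists_false] <;>
      split_ifs <;> first | rfl | tauto

-- ===== VERDICT (by name: the statement is the Claim_ definition above) =====
lemma get_dist_eq_neg_one_iff (n Z : Int) (X : List Int) :
    get_dist n Z X = -1 ↔ ¬ hitS n Z X ∧ ¬ hitP n Z X := by
  rw [get_dist_eq]; split_ifs <;> simp_all

lemma get_dist_eq_two_iff (n Z : Int) (X : List Int) :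
    get_dist n Z X = 2 ↔ ¬ hitS n Z X ∧ hitP n Z X := by
  rw [get_dist_eq]; split_ifs <;> simp_all

lemma len_diff_iff (Z1 : Int) (hZ : 2 ≤ Z1) (s : PySem.Set Int) (hnd : List.Nodup s)
    (hb : ∀ x ∈ s, 0 ≤ x ∧ x < Z1) :
    PySem.Set.len (PySem.Set.diff s [0]) = Z1 - 1 ↔ ∀ n : Int, 1 ≤ n → n < Z1 → n ∈ s := by
  have hndl : List.Nodup (PySem.Set.diff s [0]) := PySem.Set.nodup_diff s [0] hnd
  have hmem : ∀ n : Int, n ∈ PySem.Set.diff s [0] ↔ n ∈ s ∧ n ≠ 0 := fun n => by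
    simpa using PySem.Set.mem_diff s [0] n
  have hsub : (PySem.Set.diff s [0]).toFinset ⊆ Finset.Ico (1 : Int) Z1 := by
    intro x hx
    rw [List.mem_toFinset] at hx
    obtain ⟨hxs, hx0⟩ := (hmem x).mp hx
    have hb' := hb x hxs
    rw [Finset.mem_Ico]
    exact ⟨by omega, hb'.2⟩
  have hlen : PySem.Set.len (PySem.Set.diff s [0]) =
      ((PySem.Set.diff s [0]).length : Int) := rfl
  have hcard := List.toFinset_card_of_nodup hndl
  constructor
  · intro h n h1 h2
    have hq : (Finset.Ico (1 : Int) Z1).card ≤ (PySem.Set.diff s [0]).toFinset.card := by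
      rw [Int.card_Ico, hcard]
      rw [hlen] at h
      omega
    have heq := Finset.eq_of_subset_of_card_le hsub hq
    have hn : n ∈ (PySem.Set.diff s [0]).toFinset := by
      rw [heq, Finset.mem_Ico]; exact ⟨h1, h2⟩
    rw [List.mem_toFinset, hmem] at hn
    exact hn.1
  · intro h
    have hsup : Finset.Ico (1 : Int) Z1 ⊆ (PySem.Set.diff s [0]).toFinset := by
      intro x hx
      rw [Finset.mem_Ico] at hx
      rw [List.mem_toFinset, hmem]
      exact ⟨h x hx.1 hx.2, by omega⟩
    have heq := Finset.Subset.antisymm hsub hsup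
    have hc : (PySem.Set.diff s [0]).toFinset.card = (Finset.Ico (1 : Int) Z1).card := by
      rw [heq]
    rw [hcard, Int.card_Ico] at hc
    rw [hlen]
    omega

theorem calculate_diam_spec : Claim_equal_calculate_diam := by
  intro Z1 X _
  show calculate_diam Z1 X = calculate_diam_alt Z1 X
  by_cases hz : Z1 < 2
  · have hr : PySem.List.pyRange 1 Z1 1 = [] := PySem.List.pyRange_one_eq_nil (by omega)
    simp [calculate_diam, calculate_diam_alt, hz, hr, calc_go]
  · have hne : (1 : Int) ∈ PySem.List.pyRange 1 Z1 1 :=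
      PySem.List.mem_pyRange_one.mpr ⟨le_refl 1, by omega⟩
    rw [calculate_diam, calc_go_eq Z1 X _ (-2) (Or.inl rfl)]
    simp only [calculate_diam_alt, if_neg hz]
    have hm1 : ∀ nn : Int, nn ∈ PySem.Set.ofList (X.map fun x => PySem.Int.mod x Z1) ↔
        hitS nn Z1 X := by
      intro nn
      rw [PySem.Set.mem_ofList _ _, List.mem_map]
    have hm2 : ∀ nn : Int, nn ∈ PySem.Set.ofList
        (X.flatMap fun x => X.map fun y => PySem.Int.mod (x + y) Z1) ↔ hitP nn Z1 X := by
      intro nn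
      rw [PySem.Set.mem_ofList _ _, List.mem_flatMap]
      unfold hitP
      constructor
      · rintro ⟨x, hx, hmem⟩
        obtain ⟨y, hy, rfl⟩ := List.mem_map.mp hmem
        exact ⟨x, hx, y, hy, rfl⟩
      · rintro ⟨x, hx, y, hy, h⟩
        exact ⟨x, hx, List.mem_map.mpr ⟨y, hy, h⟩⟩
    have hbound1 : ∀ x ∈ PySem.Set.ofList (X.map fun x => PySem.Int.mod x Z1),
        0 ≤ x ∧ x < Z1 := by
      intro x hx
      rw [PySem.Set.mem_ofList _ _, List.mem_map] at hx
      obtain ⟨y, _, rfl⟩ := hx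
      exact ⟨PySem.Int.mod_nonneg _ (by omega), PySem.Int.mod_lt _ (by omega)⟩
    have hbound12 : ∀ x ∈ PySem.Set.union (PySem.Set.ofList (X.map fun x => PySem.Int.mod x Z1))
        (PySem.Set.ofList (X.flatMap fun x => X.map fun y => PySem.Int.mod (x + y) Z1)),
        0 ≤ x ∧ x < Z1 := by
      intro x hx
      rw [PySem.Set.mem_union _ _ _] at hx
      rcases hx with hx | hx
      · exact hbound1 x hx
      · rw [PySem.Set.mem_ofList _ _, List.mem_flatMap] at hx
        obtain ⟨y, _, hy⟩ := hx
        obtain ⟨z, _, rfl⟩ := List.mem_map.mp hy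
        exact ⟨PySem.Int.mod_nonneg _ (by omega), PySem.Int.mod_lt _ (by omega)⟩
    have hsub1 : PySem.Set.len (PySem.Set.diff
        (PySem.Set.ofList (X.map fun x => PySem.Int.mod x Z1)) [0]) = Z1 - 1 ↔
        ∀ nn ∈ PySem.List.pyRange 1 Z1 1, hitS nn Z1 X := by
      rw [len_diff_iff Z1 (by omega) _ (PySem.Set.nodup_ofList _) hbound1]
      constructor
      · intro h nn hnn
        obtain ⟨h1, h2⟩ := PySem.List.mem_pyRange_one.mp hnn
        exact (hm1 nn).mp (h nn h1 h2)
      · intro h nn h1 h2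
        exact (hm1 nn).mpr (h nn (PySem.List.mem_pyRange_one.mpr ⟨h1, h2⟩))
    have hsub2 : PySem.Set.len (PySem.Set.diff
        (PySem.Set.union (PySem.Set.ofList (X.map fun x => PySem.Int.mod x Z1))
          (PySem.Set.ofList (X.flatMap fun x => X.map fun y => PySem.Int.mod (x + y) Z1))) [0]) =
        Z1 - 1 ↔
        ∀ nn ∈ PySem.List.pyRange 1 Z1 1, hitS nn Z1 X ∨ hitP nn Z1 X := by
      rw [len_diff_iff Z1 (by omega) _
        (PySem.Set.nodup_union _ _ (PySem.Set.nodup_ofList _)) hbound12]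
      constructor
      · intro h nn hnn
        obtain ⟨h1, h2⟩ := PySem.List.mem_pyRange_one.mp hnn
        have := h nn h1 h2
        rw [PySem.Set.mem_union _ _ _] at this
        rcases this with h' | h'
        · exact Or.inl ((hm1 nn).mp h')
        · exact Or.inr ((hm2 nn).mp h')
      · intro h nn h1 h2
        rw [PySem.Set.mem_union _ _ _]
        rcases h nn (PySem.List.mem_pyRange_one.mpr ⟨h1, h2⟩) with h' | h'
        · exact Or.inl ((hm1 nn).mpr h')
        · exact Or.inr ((hm2 nn).mpr h')
    by_cases hc : ∀ nn ∈ PySem.List.pyRange 1 Z1 1, hitS nn Z1 X ∨ hitP nn Z1 X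
    · have hno1 : ¬ ∃ nn ∈ PySem.List.pyRange 1 Z1 1, get_dist nn Z1 X = -1 := by
        rintro ⟨nn, hnn, hd⟩
        rw [get_dist_eq_neg_one_iff] at hd
        rcases hc nn hnn with h | h
        · exact hd.1 h
        · exact hd.2 h
      rw [if_neg hno1]
      by_cases hall : ∀ nn ∈ PySem.List.pyRange 1 Z1 1, hitS nn Z1 X
      · rw [if_pos (hsub1.mpr hall)]
        have hno2 : ¬ ((-2 : Int) = 2 ∨ ∃ nn ∈ PySem.List.pyRange 1 Z1 1, get_dist nn Z1 X = 2) := by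
          rintro (h | ⟨nn, hnn, hd⟩)
          · omega
          · exact ((get_dist_eq_two_iff nn Z1 X).mp hd).1 (hall nn hnn)
        rw [if_neg hno2, if_pos (Or.inr (by simp [hne]; exact List.ne_nil_of_mem hne))]
      · rw [if_neg (fun h => hall (hsub1.mp h)), if_pos (hsub2.mpr hc)]
        push_neg at hall
        obtain ⟨nn, hnn, hnS0⟩ := hall
        have hnS : ¬ hitS nn Z1 X := fun ⟨x, hx, hh⟩ => hnS0 x hx hh
        have hP : hitP nn Z1 X := (hc nn hnn).resolve_left hnS
        have : ∃ nn ∈ PySem.List.pyRange 1 Z1 1, get_dist nn Z1 X = 2 :=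
          ⟨nn, hnn, (get_dist_eq_two_iff nn Z1 X).mpr ⟨hnS, hP⟩⟩
        rw [if_pos (Or.inr this)]
    · push_neg at hc
      obtain ⟨nn, hnn, hnn0⟩ := hc
      have hnn2 : ¬ hitS nn Z1 X ∧ ¬ hitP nn Z1 X :=
        ⟨fun ⟨x, hx, hh⟩ => hnn0.1 x hx hh, fun ⟨x, hx, y, hy, hh⟩ => hnn0.2 x hx y hy hh⟩
      have : ∃ nn ∈ PySem.List.pyRange 1 Z1 1, get_dist nn Z1 X = -1 :=
        ⟨nn, hnn, (get_dist_eq_neg_one_iff nn Z1 X).mpr hnn2⟩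
      rw [if_pos this]
      rw [if_neg (fun h => hnn2.1 (hsub1.mp h nn hnn)),
          if_neg (fun h => (hsub2.mp h nn hnn).elim hnn2.1 hnn2.2)]
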